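-- pv_equiv track=rewrite | github.com/Haksssal/Coach-flou | SystemeFL.py | generer_programme
-- ===== SOURCE A (Python) =====
-- def generer_programme(intensites_reelles):
--     # Classement des parties du corps par intensité décroissante
--     parties_tries = sorted(intensites_reelles.items(), key=lambda x: x[1], reverse=True)
--     programme = []
--     jours_utilises = 0
--     jours_max = 6  # Limiter à 6 jours d'entraînement
--
--     # Garder une trace du nombre de séances par partie
--     parties_entrainees = {partie: 0 for partie in intensites_reelles}
--
--     while jours_utilises < jours_max:
--         ajouté = False
--         for partie, intensite in parties_tries:
--             # Vérifier si la partie peut être entraînée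
--             if parties_entrainees[partie] < 2 and jours_utilises < jours_max:
--                 if intensite > 20:
--                     programme.append(f"Séance {partie} (très intense)")
--                 elif intensite > 15:
--                     programme.append(f"Séance {partie} (intense)")
--                 elif intensite > 10:
--                     programme.append(f"Séance {partie} (modérée)")
--                 elif intensite > 5:
--                     programme.append(f"Séance {partie} (légère)")
--                 else:
--                     continue
--                 parties_entrainees[partie] += 1
--                 ajouté = True
--                 jours_utilises += 1
--
--         # Ajouter du repos si rien n'est ajouté
--         if not ajouté and jours_utilises < jours_max:
--             programme.append("Repos")
--             jours_utilises += 1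
--
--     return programme
-- ===== SOURCE B (Python) =====
-- def generer_programme(intensites_reelles):
--     # Eligible parts (intensity > 5) sorted by decreasing intensity, each mapped to its labeled session.
--     eligible = sorted(intensites_reelles.items(), key=lambda x: x[1], reverse=True)
--     labeled = []
--     for partie, intensite in eligible:
--         if intensite > 20:
--             labeled.append(f"Séance {partie} (très intense)")
--         elif intensite > 15:
--             labeled.append(f"Séance {partie} (intense)")
--         elif intensite > 10:
--             labeled.append(f"Séance {partie} (modérée)")
--         elif intensite > 5:
--             labeled.append(f"Séance {partie} (légère)")
--     # Each part gets at most 2 sessions: two rounds, truncated to 6 days, padded with rest days.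
--     programme = (labeled + labeled)[:6]
--     programme += ["Repos"] * (6 - len(programme))
--     return programme
-- ===== Notes on version B (the rewrite author's own statement) =====
-- stated objective: simpler
-- what changed: Replaces the while-loop with per-part session counters and a rest-day fallback by a direct construction: label the eligible (intensity > 5) parts once in sorted order, concatenate two rounds, truncate to 6 and pad with 'Repos'.
import Mathlib
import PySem

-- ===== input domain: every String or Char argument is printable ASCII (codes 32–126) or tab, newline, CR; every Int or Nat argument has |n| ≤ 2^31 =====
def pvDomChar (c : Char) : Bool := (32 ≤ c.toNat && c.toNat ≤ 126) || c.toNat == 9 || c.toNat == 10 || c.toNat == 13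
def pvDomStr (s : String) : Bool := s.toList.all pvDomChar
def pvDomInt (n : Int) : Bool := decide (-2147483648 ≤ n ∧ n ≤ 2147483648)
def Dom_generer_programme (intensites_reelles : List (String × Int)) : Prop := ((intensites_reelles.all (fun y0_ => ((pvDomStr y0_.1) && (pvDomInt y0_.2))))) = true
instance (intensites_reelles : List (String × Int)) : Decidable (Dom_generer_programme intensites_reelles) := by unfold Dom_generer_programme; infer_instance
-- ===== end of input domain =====

-- B replaces A's while-loop with session counters by a direct construction (two labeled rounds,
-- truncated to 6 and padded with "Repos"): simpler, same result on dict inputs (distinct keys).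


-- ===== PORT A =====
-- one pass of the inner 'for partie, intensite in parties_tries' loop;
-- state = (programme, parties_entrainees, jours_utilises, ajouté)
def pvStepA (st : List String × PySem.Dict String Int × Int × Bool) (x : String × Int) :
    List String × PySem.Dict String Int × Int × Bool :=
  match st, x with
  | (prog, trained, jours, aj), (partie, intensite) =>
    if trained.getD partie 0 < 2 ∧ jours < 6 then
      if intensite > 20 then
        (prog ++ ["Séance " ++ partie ++ " (très intense)"],
         trained.insert partie (trained.getD partie 0 + 1), jours + 1, true)
      else if intensite > 15 then
        (prog ++ ["Séance " ++ partie ++ " (intense)"],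
         trained.insert partie (trained.getD partie 0 + 1), jours + 1, true)
      else if intensite > 10 then
        (prog ++ ["Séance " ++ partie ++ " (modérée)"],
         trained.insert partie (trained.getD partie 0 + 1), jours + 1, true)
      else if intensite > 5 then
        (prog ++ ["Séance " ++ partie ++ " (légère)"],
         trained.insert partie (trained.getD partie 0 + 1), jours + 1, true)
      else (prog, trained, jours, aj)   -- continue
    else (prog, trained, jours, aj)

def pvInnerA (tries : List (String × Int)) (st : List String × PySem.Dict String Int × Int × Bool) :
    List String × PySem.Dict String Int × Int × Bool :=
  tries.foldl pvStepA st

-- the 'while jours_utilises < jours_max' loop; fuel only makes it total: jours strictly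
-- increases each iteration, so 6 units of fuel always suffice from jours = 0
def pvLoopA (fuel : Nat) (tries : List (String × Int)) (prog : List String)
    (trained : PySem.Dict String Int) (jours : Int) : List String :=
  match fuel with
  | 0 => prog
  | Nat.succ f =>
    if jours < 6 then
      match pvInnerA tries (prog, trained, jours, false) with
      | (prog', trained', jours', aj) =>
        if aj = false ∧ jours' < 6 then pvLoopA f tries (prog' ++ ["Repos"]) trained' (jours' + 1)
        else pvLoopA f tries prog' trained' jours'
    else prog

def generer_programme (intensites_reelles : List (String × Int)) : List String :=
  let parties_tries := PySem.List.sorted intensites_reelles (fun x => x.2) true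
  let parties_entrainees :=
    intensites_reelles.foldl (fun d p => d.insert p.1 (0 : Int)) PySem.Dict.empty
  pvLoopA 6 parties_tries [] parties_entrainees 0

-- ===== PORT B =====
def generer_programme_alt (intensites_reelles : List (String × Int)) : List String :=
  let eligible := PySem.List.sorted intensites_reelles (fun x => x.2) true
  let labeled := eligible.foldl (fun acc x =>
    if x.2 > 20 then acc ++ ["Séance " ++ x.1 ++ " (très intense)"]
    else if x.2 > 15 then acc ++ ["Séance " ++ x.1 ++ " (intense)"]
    else if x.2 > 10 then acc ++ ["Séance " ++ x.1 ++ " (modérée)"]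
    else if x.2 > 5 then acc ++ ["Séance " ++ x.1 ++ " (légère)"]
    else acc) []
  let programme := (labeled ++ labeled).take 6
  programme ++ List.replicate (6 - programme.length) "Repos"

-- ===== PRECONDITION & SPEC =====
-- Pre_ requires pairwise-distinct keys: the Python argument is a dict, so an association
-- list with duplicate keys does not correspond to any actual input of A.
def Pre_generer_programme (intensites_reelles : List (String × Int)) : Prop :=
  (intensites_reelles.map Prod.fst).Nodup
instance (intensites_reelles : List (String × Int)) : Decidable (Pre_generer_programme intensites_reelles) := by unfold Pre_generer_programme; infer_instance
def pvWitness_generer_programme : (List (String × Int)) := [("a", 25), ("b", 7)]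
def Spec_generer_programme (intensites_reelles : List (String × Int)) (out : List String) : Prop := out = generer_programme_alt intensites_reelles
instance (intensites_reelles : List (String × Int)) (out : List String) : Decidable (Spec_generer_programme intensites_reelles out) := by unfold Spec_generer_programme; infer_instance

-- ===== CLAIM (what is proved, stated in full; the proofs are below) =====
def Claim_equal_generer_programme : Prop := ∀ (intensites_reelles : List (String × Int)), Dom_generer_programme intensites_reelles → Pre_generer_programme intensites_reelles → Spec_generer_programme intensites_reelles (generer_programme intensites_reelles)

-- ===== LEMMAS AND PROOFS =====

-- the session label of an eligible part
def pvLabel (x : String × Int) : String :=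
  "Séance " ++ x.1 ++ (if x.2 > 20 then " (très intense)" else if x.2 > 15 then " (intense)"
    else if x.2 > 10 then " (modérée)" else " (légère)")

-- the labeled eligible list, once
def pvElig (tries : List (String × Int)) : List String :=
  (tries.filter (fun x => decide (x.2 > 5))).map pvLabel

theorem pvLabeledB_eq (tries : List (String × Int)) (acc : List String) :
    tries.foldl (fun acc x =>
      if x.2 > 20 then acc ++ ["Séance " ++ x.1 ++ " (très intense)"]
      else if x.2 > 15 then acc ++ ["Séance " ++ x.1 ++ " (intense)"]
      else if x.2 > 10 then acc ++ ["Séance " ++ x.1 ++ " (modérée)"]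
      else if x.2 > 5 then acc ++ ["Séance " ++ x.1 ++ " (légère)"]
      else acc) acc = acc ++ pvElig tries := by
  induction tries generalizing acc with
  | nil => simp [pvElig]
  | cons x t ih =>
    simp only [List.foldl_cons]
    rw [ih]
    by_cases h20 : x.2 > 20 <;> by_cases h15 : x.2 > 15 <;> by_cases h10 : x.2 > 10 <;>
      by_cases h5 : x.2 > 5 <;>
      simp [pvElig, pvLabel, h20, h15, h10, h5] <;> omega

-- the inner pass never touches keys outside tries
theorem pvInnerA_getD_not_mem (tries : List (String × Int))
    (st : List String × PySem.Dict String Int × Int × Bool) (k : String)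
    (hk : k ∉ tries.map Prod.fst) :
    (pvInnerA tries st).2.1.getD k 0 = st.2.1.getD k 0 := by
  induction tries generalizing st with
  | nil => rfl
  | cons x t ih =>
    simp only [List.map_cons, List.mem_cons, not_or] at hk
    have := ih (pvStepA st x) hk.2
    rw [pvInnerA, List.foldl_cons, ← pvInnerA, this]
    obtain ⟨prog, trained, jours, aj⟩ := st
    simp only [pvStepA]
    split_ifs <;> simp [PySem.Dict.getD_insert, hk.1]

-- saturated pass: every eligible part already has 2 sessions → state unchanged
theorem pvInnerA_noop (tries : List (String × Int)) (prog : List String)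
    (trained : PySem.Dict String Int) (j : Int) (aj : Bool)
    (hsat : ∀ x ∈ tries, x.2 > 5 → 2 ≤ trained.getD x.1 0) :
    pvInnerA tries (prog, trained, j, aj) = (prog, trained, j, aj) := by
  induction tries with
  | nil => rfl
  | cons x t ih =>
    rw [pvInnerA, List.foldl_cons, ← pvInnerA]
    have hx : pvStepA (prog, trained, j, aj) x = (prog, trained, j, aj) := by
      simp only [pvStepA]
      split_ifs with h h20 h15 h10 h5 <;> try rfl
      · exact absurd (hsat x (by simp) (by omega)) (by omega)
      · exact absurd (hsat x (by simp) (by omega)) (by omega)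
      · exact absurd (hsat x (by simp) (by omega)) (by omega)
      · exact absurd (hsat x (by simp) (by omega)) (by omega)
    rw [hx]
    exact ih (fun y hy => hsat y (by simp [hy]))

-- active pass: uniform count c < 2 on eligible parts
theorem pvInnerA_active (tries : List (String × Int)) (prog : List String)
    (trained : PySem.Dict String Int) (j : Int) (aj : Bool) (c : Int)
    (hnd : (tries.map Prod.fst).Nodup) (hj : 0 ≤ j) (hj6 : j ≤ 6) (hc : c < 2)
    (hinv : ∀ x ∈ tries, x.2 > 5 → trained.getD x.1 0 = c) :
    (pvInnerA tries (prog, trained, j, aj)).1 = prog ++ (pvElig tries).take (6 - j).toNat ∧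
    (pvInnerA tries (prog, trained, j, aj)).2.2.1 = min (j + (pvElig tries).length) 6 ∧
    (pvInnerA tries (prog, trained, j, aj)).2.2.2
      = (aj || (decide (j < 6) && decide (pvElig tries ≠ []))) ∧
    (j + (pvElig tries).length ≤ 6 →
      ∀ x ∈ tries, x.2 > 5 → (pvInnerA tries (prog, trained, j, aj)).2.1.getD x.1 0 = c + 1) := by
  induction tries generalizing prog trained j aj with
  | nil =>
    refine ⟨by simp [pvInnerA, pvElig], by simp [pvInnerA, pvElig]; omega,
      by simp [pvInnerA, pvElig], by simp⟩
  | cons x t ih =>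
    obtain ⟨p, i⟩ := x
    simp only [List.map_cons, List.nodup_cons] at hnd
    by_cases h5 : i > 5
    · have hEc : pvElig ((p, i) :: t) = pvLabel (p, i) :: pvElig t := by
        simp [pvElig, h5]
      by_cases hlt : j < 6
      · -- the part is trained today
        have hstep : pvStepA (prog, trained, j, aj) (p, i)
            = (prog ++ [pvLabel (p, i)], trained.insert p (c + 1), j + 1, true) := by
          have hgd : trained.getD p 0 = c := hinv (p, i) (by simp) h5
          simp only [pvStepA, hgd]
          rw [if_pos ⟨hc, hlt⟩]
          simp only [pvLabel]
          split_ifs <;> simp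
        have hinv' : ∀ y ∈ t, y.2 > 5 → (trained.insert p (c + 1)).getD y.1 0 = c := by
          intro y hy h5y
          have hne : y.1 ≠ p := by
            intro he
            exact hnd.1 (he ▸ List.mem_map_of_mem (f := Prod.fst) hy)
          rw [PySem.Dict.getD_insert, if_neg hne]
          exact hinv y (by simp [hy]) h5y
        obtain ⟨ih1, ih2, ih3, ih4⟩ := ih (prog ++ [pvLabel (p, i)]) (trained.insert p (c + 1))
          (j + 1) true hnd.2 (by omega) (by omega) hinv'
        rw [pvInnerA, List.foldl_cons, ← pvInnerA, hstep]
        have htake : (6 - j).toNat = (6 - (j + 1)).toNat + 1 := by omega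
        refine ⟨?_, ?_, ?_, ?_⟩
        · rw [ih1, hEc, htake, List.take_succ_cons, List.append_assoc]; rfl
        · rw [ih2, hEc]; simp only [List.length_cons]; omega
        · rw [ih3]; simp [hlt, hEc]
        · intro hle y hy h5y
          rcases List.mem_cons.mp hy with he | hm
          · subst he
            rw [pvInnerA_getD_not_mem t _ _ hnd.1, PySem.Dict.getD_insert, if_pos rfl]
          · exact ih4 (by rw [hEc] at hle; simp only [List.length_cons] at hle; omega) y hm h5y
      · -- jours_max already reached: state unchanged
        have hstep : pvStepA (prog, trained, j, aj) (p, i) = (prog, trained, j, aj) := by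
          simp only [pvStepA]
          rw [if_neg (by intro h; exact hlt h.2)]
        obtain ⟨ih1, ih2, ih3, ih4⟩ := ih prog trained j aj hnd.2 hj hj6
          (fun y hy h5y => hinv y (by simp [hy]) h5y)
        rw [pvInnerA, List.foldl_cons, ← pvInnerA, hstep]
        have hj6' : j = 6 := by omega
        refine ⟨?_, ?_, ?_, ?_⟩
        · have h0 : (6 - j).toNat = 0 := by omega
          rw [ih1, h0]; simp
        · rw [ih2, hEc]; simp only [List.length_cons]; omega
        · rw [ih3]; simp [hlt]
        · intro hle; rw [hEc] at hle; simp only [List.length_cons] at hle; omega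
    · -- intensity ≤ 5: 'continue'
      have hstep : pvStepA (prog, trained, j, aj) (p, i) = (prog, trained, j, aj) := by
        simp only [pvStepA]
        split_ifs <;> first | rfl | omega
      have hEc : pvElig ((p, i) :: t) = pvElig t := by simp [pvElig, h5]
      obtain ⟨ih1, ih2, ih3, ih4⟩ := ih prog trained j aj hnd.2 hj hj6
        (fun y hy h5y => hinv y (by simp [hy]) h5y)
      rw [pvInnerA, List.foldl_cons, ← pvInnerA, hstep]
      refine ⟨by rw [ih1, hEc], by rw [ih2, hEc], by rw [ih3, hEc], ?_⟩
      intro hle y hy h5y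
      rcases List.mem_cons.mp hy with he | hm
      · subst he; exact absurd h5y h5
      · exact ih4 (by rwa [hEc] at hle) y hm h5y

-- rest-day rounds: nothing addable → one "Repos" per remaining day
theorem pvLoopA_repos (fuel : Nat) (tries : List (String × Int)) (prog : List String)
    (trained : PySem.Dict String Int) (j : Int)
    (hj0 : 0 ≤ j) (hj6 : j ≤ 6) (hfuel : (6 - j).toNat ≤ fuel)
    (hsat : ∀ x ∈ tries, x.2 > 5 → 2 ≤ trained.getD x.1 0) :
    pvLoopA fuel tries prog trained j = prog ++ List.replicate (6 - j).toNat "Repos" := by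
  induction fuel generalizing prog j with
  | zero =>
    have h0 : (6 - j).toNat = 0 := by omega
    rw [h0]; simp [pvLoopA]
  | succ f ih =>
    rw [pvLoopA]
    by_cases h : j < 6
    · rw [if_pos h, pvInnerA_noop tries prog trained j false hsat]
      simp only [true_and, if_pos h]
      rw [ih (prog ++ ["Repos"]) (j + 1) (by omega) (by omega) (by omega)]
      have : (6 - j).toNat = (6 - (j + 1)).toNat + 1 := by omega
      rw [this, List.replicate_succ, List.append_assoc]
      rfl
    · rw [if_neg h]
      have : (6 - j).toNat = 0 := by omega
      simp [this]

theorem pvTrained0_getD (l : List (String × Int)) (d : PySem.Dict String Int)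
    (hd : ∀ k, d.getD k 0 = 0) (k : String) :
    (l.foldl (fun d p => d.insert p.1 (0 : Int)) d).getD k 0 = 0 := by
  induction l generalizing d with
  | nil => exact hd k
  | cons x t ih =>
    rw [List.foldl_cons]
    exact ih _ (fun k' => by rw [PySem.Dict.getD_insert]; split <;> simp [hd])

theorem pvLoopA_succ (f : Nat) (tries : List (String × Int)) (prog : List String)
    (trained : PySem.Dict String Int) (j : Int) :
    pvLoopA (f + 1) tries prog trained j =
      if j < 6 then
        (if (pvInnerA tries (prog, trained, j, false)).2.2.2 = false ∧
            (pvInnerA tries (prog, trained, j, false)).2.2.1 < 6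
         then pvLoopA f tries ((pvInnerA tries (prog, trained, j, false)).1 ++ ["Repos"])
                (pvInnerA tries (prog, trained, j, false)).2.1
                ((pvInnerA tries (prog, trained, j, false)).2.2.1 + 1)
         else pvLoopA f tries (pvInnerA tries (prog, trained, j, false)).1
                (pvInnerA tries (prog, trained, j, false)).2.1
                (pvInnerA tries (prog, trained, j, false)).2.2.1)
      else prog := rfl

-- ===== VERDICT (by name: the statement is the Claim_ definition above) =====
theorem generer_programme_spec : Claim_equal_generer_programme := by
  intro l _hdom hpre
  unfold Spec_generer_programme generer_programme generer_programme_alt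
  set tries := PySem.List.sorted l (fun x => x.2) true with htries
  set trained0 := l.foldl (fun d p => d.insert p.1 (0 : Int)) PySem.Dict.empty with htr
  have hperm : tries.Perm l := PySem.List.sorted_perm l (fun x => x.2) true
  have hnd : (tries.map Prod.fst).Nodup := ((hperm.map Prod.fst).nodup_iff).mpr hpre
  dsimp only
  rw [pvLabeledB_eq tries [], List.nil_append]
  set E := pvElig tries with hE
  set n := E.length with hn
  have hinv0 : ∀ x ∈ tries, x.2 > 5 → trained0.getD x.1 0 = 0 := fun x _ _ =>
    pvTrained0_getD l PySem.Dict.empty (fun k => by simp) x.1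
  obtain ⟨h1, h2, h3, h4⟩ := pvInnerA_active tries [] trained0 0 false 0 hnd
    (by omega) (by omega) (by omega) hinv0
  simp only [← hE, ← hn] at h1 h2 h3 h4
  rw [show (6 : Nat) = 5 + 1 from rfl, pvLoopA_succ, if_pos (by omega)]
  by_cases hEnil : E = []
  · -- no eligible part at all: six rest days
    have hp : (pvInnerA tries ([], trained0, 0, false)).1 = [] := by
      rw [h1, hEnil]; rfl
    have hn0 : n = 0 := by rw [hn, hEnil]; rfl
    have hjj : (pvInnerA tries ([], trained0, 0, false)).2.2.1 = 0 := by
      rw [h2]; omega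
    have hcond : (pvInnerA tries ([], trained0, 0, false)).2.2.2 = false ∧
        (pvInnerA tries ([], trained0, 0, false)).2.2.1 < 6 :=
      ⟨by simp [h3, hEnil], by rw [hjj]; omega⟩
    have hsat : ∀ x ∈ tries, x.2 > 5 →
        2 ≤ (pvInnerA tries ([], trained0, 0, false)).2.1.getD x.1 0 := by
      intro x hx h5x
      exfalso
      have hmem : pvLabel x ∈ E := by
        rw [hE, pvElig]
        exact List.mem_map_of_mem (List.mem_filter.mpr ⟨hx, by simpa⟩)
      rw [hEnil] at hmem
      exact absurd hmem (List.not_mem_nil)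
    rw [if_pos hcond, hp, hjj,
      pvLoopA_repos 5 tries _ _ (0+1) (by omega) (by omega) (by omega) hsat, hEnil]
    rfl
  · have hn1 : 1 ≤ n := by
      rw [hn]; exact List.length_pos_of_ne_nil hEnil
    rw [if_neg (by rw [h3]; simp [hEnil])]
    have hj1 : (pvInnerA tries ([], trained0, 0, false)).2.2.1 = min (n : Int) 6 := by
      rw [h2]; omega
    have hp1 : (pvInnerA tries ([], trained0, 0, false)).1 = E.take 6 := by
      rw [h1]; rfl
    by_cases h6 : 6 ≤ n
    · -- ≥ 6 eligible parts: the first round fills the whole week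
      rw [hj1, show min ((n : Int)) 6 = 6 by omega, hp1,
        show (5 : Nat) = 4 + 1 from rfl, pvLoopA_succ, if_neg (by omega)]
      have hlen : ((E ++ E).take 6).length = 6 := by
        simp [List.length_take]; omega
      rw [hlen, List.take_append, show 6 - E.length = 0 by omega]
      simp
    · -- fewer than 6 eligible parts: a second round, then rest days
      have htk : E.take 6 = E := List.take_of_length_le (by omega)
      rw [hj1, show min ((n : Int)) 6 = (n : Int) by omega, hp1, htk]
      have hinv1 : ∀ x ∈ tries, x.2 > 5 →
          (pvInnerA tries ([], trained0, 0, false)).2.1.getD x.1 0 = 1 := by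
        intro x hx h5x
        have := h4 (by omega) x hx h5x
        omega
      obtain ⟨g1, g2, g3, g4⟩ := pvInnerA_active tries E
        (pvInnerA tries ([], trained0, 0, false)).2.1 (n : Int) false 1 hnd
        (by omega) (by omega) (by omega) hinv1
      simp only [← hE, ← hn] at g1 g2 g3 g4
      rw [show (5 : Nat) = 4 + 1 from rfl, pvLoopA_succ, if_pos (by omega),
        if_neg (by rw [g3]; simp [hEnil]; omega)]
      have htoNat : ((6 : Int) - (n : Int)).toNat = 6 - n := by omega
      rw [g1, g2, htoNat]
      by_cases h3n : 6 ≤ 2 * n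
      · -- the second round is truncated: week full
        rw [show min ((n : Int) + (n : Int)) 6 = 6 by omega,
          show (4 : Nat) = 3 + 1 from rfl, pvLoopA_succ, if_neg (by omega)]
        have hlen : ((E ++ E).take 6).length = 6 := by
          simp [List.length_take]; omega
        rw [hlen, List.take_append, ← hn, htk]
        simp
      · -- both rounds fit: pad with rest days
        have htkE : E.take (6 - n) = E := List.take_of_length_le (by omega)
        have hsat2 : ∀ x ∈ tries, x.2 > 5 →
            2 ≤ (pvInnerA tries (E, (pvInnerA tries ([], trained0, 0, false)).2.1,
              (n : Int), false)).2.1.getD x.1 0 := by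
          intro x hx h5x
          have := g4 (by omega) x hx h5x
          omega
        rw [show min ((n : Int) + (n : Int)) 6 = ((n : Int) + (n : Int)) by omega,
          pvLoopA_repos 4 tries _ _ _ (by omega) (by omega) (by omega) hsat2]
        have htk2 : (E ++ E).take 6 = E ++ E := List.take_of_length_le (by simp; omega)
        rw [htkE, htk2]
        have hlen2 : (E ++ E).length = 2 * n := by simp; omega
        rw [hlen2]
        congr 2
        omega
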